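-- pv_equiv track=rewrite | github.com/RiddhiRex/Practice_code | CharityAlloc.py | charityAllocation
-- ===== SOURCE A (Python) =====
-- def charityAllocation(profits):
--     sumA=0
--     sumB=0
--     sumC=0
--     result = []
--     for each in profits:
--         if(sumA == min(sumA, sumB, sumC)):
--             sumA= sumA+each
--             result.append('A')
--         elif(sumB == min(sumA, sumB, sumC)):
--             sumB= sumB+each
--             result.append('B')
--         else:
--             sumC= sumC+each
--             result.append('C')
--     return result
-- ===== SOURCE B (Python) =====
-- def charityAllocation(profits):
--     # priority structure: keep the three buckets as a list of (sum, label)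
--     # tuples sorted ascending; tuple order breaks sum-ties by label A<B<C,
--     # exactly the original's preference.
--     buckets = [(0, 'A'), (0, 'B'), (0, 'C')]
--     result = []
--     for p in profits:
--         (s, lab), rest = buckets[0], buckets[1:]
--         result.append(lab)
--         e = (s + p, lab)
--         i = 0
--         while i < len(rest) and rest[i] < e:
--             i += 1
--         buckets = rest[:i] + [e] + rest[i:]
--     return result
-- ===== Notes on version B (the rewrite author's own statement) =====
-- stated objective: alternative
-- what changed: Replaced the three named running sums with repeated 3-way min scans and an if/elif chain by a priority structure: a list of (sum, label) buckets kept sorted ascending (tuple order breaks ties A<B<C), popping the head and reinserting after each profit.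
import Mathlib
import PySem

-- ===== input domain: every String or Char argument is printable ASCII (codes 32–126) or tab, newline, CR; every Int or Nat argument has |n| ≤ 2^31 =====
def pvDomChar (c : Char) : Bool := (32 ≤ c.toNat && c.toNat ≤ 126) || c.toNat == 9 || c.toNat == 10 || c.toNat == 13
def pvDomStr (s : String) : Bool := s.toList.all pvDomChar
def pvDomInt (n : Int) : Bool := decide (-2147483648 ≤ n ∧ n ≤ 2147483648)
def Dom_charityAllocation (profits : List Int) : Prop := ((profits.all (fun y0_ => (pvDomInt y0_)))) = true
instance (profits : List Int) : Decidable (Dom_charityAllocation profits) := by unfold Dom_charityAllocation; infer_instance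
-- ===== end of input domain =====

-- B replaces A's three named sums and repeated 3-way min scans by a sorted list of
-- (sum, label) buckets: pop the head, reinsert; same cost, different decomposition.

-- ===== PORT A =====
def charityAllocationStep (st : Int × Int × Int × List String) (each : Int) :
    Int × Int × Int × List String :=
  match st with
  | (sumA, sumB, sumC, result) =>
    if sumA = min sumA (min sumB sumC) then (sumA + each, sumB, sumC, result ++ ["A"])
    else if sumB = min sumA (min sumB sumC) then (sumA, sumB + each, sumC, result ++ ["B"])
    else (sumA, sumB, sumC + each, result ++ ["C"])

def charityAllocation (profits : List Int) : List String :=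
  (profits.foldl charityAllocationStep (0, 0, 0, [])).2.2.2

-- ===== PORT B =====
-- Python tuple comparison (s1, lab1) < (s2, lab2)
def pairLt (a b : Int × String) : Bool := a.1 < b.1 || (a.1 == b.1 && decide (a.2 < b.2))

-- the while-loop splice of Source B: insert e before the first element not < e
def insertPair (e : Int × String) : List (Int × String) → List (Int × String)
  | [] => [e]
  | x :: xs => if pairLt x e then x :: insertPair e xs else e :: x :: xs

def charityAllocationAltStep (st : List (Int × String) × List String) (p : Int) :
    List (Int × String) × List String :=
  match st.1 with
  | [] => st
  | (s, lab) :: rest => (insertPair (s + p, lab) rest, st.2 ++ [lab])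

def charityAllocation_alt (profits : List Int) : List String :=
  (profits.foldl charityAllocationAltStep ([(0, "A"), (0, "B"), (0, "C")], [])).2

-- ===== PRECONDITION & SPEC =====
def Spec_charityAllocation (profits : List Int) (out : List String) : Prop := out = charityAllocation_alt profits
instance (profits : List Int) (out : List String) : Decidable (Spec_charityAllocation profits out) := by unfold Spec_charityAllocation; infer_instance

-- ===== CLAIM (what is proved, stated in full; the proofs are below) =====
def Claim_equal_charityAllocation : Prop := ∀ (profits : List Int), Dom_charityAllocation profits → Spec_charityAllocation profits (charityAllocation profits)

-- ===== LEMMAS AND PROOFS =====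

-- the sorted arrangement of the three buckets, ties broken A < B < C
def sort3 (sA sB sC : Int) : List (Int × String) :=
  if sA ≤ sB then
    if sA ≤ sC then (sA, "A") :: (if sB ≤ sC then [(sB, "B"), (sC, "C")] else [(sC, "C"), (sB, "B")])
    else [(sC, "C"), (sA, "A"), (sB, "B")]
  else
    if sB ≤ sC then (sB, "B") :: (if sA ≤ sC then [(sA, "A"), (sC, "C")] else [(sC, "C"), (sA, "A")])
    else [(sC, "C"), (sB, "B"), (sA, "A")]

lemma dAB : (decide (("A" : String) < "B")) = true := by
  rw [decide_eq_true_eq, String.lt_iff_toList_lt]; decide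
lemma dBA : (decide (("B" : String) < "A")) = false := by
  rw [decide_eq_false_iff_not, String.lt_iff_toList_lt]; decide
lemma dAC : (decide (("A" : String) < "C")) = true := by
  rw [decide_eq_true_eq, String.lt_iff_toList_lt]; decide
lemma dCA : (decide (("C" : String) < "A")) = false := by
  rw [decide_eq_false_iff_not, String.lt_iff_toList_lt]; decide
lemma dBC : (decide (("B" : String) < "C")) = true := by
  rw [decide_eq_true_eq, String.lt_iff_toList_lt]; decide
lemma dCB : (decide (("C" : String) < "B")) = false := by
  rw [decide_eq_false_iff_not, String.lt_iff_toList_lt]; decide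

lemma astep_eq (sA sB sC p : Int) (acc : List String) :
    charityAllocationStep (sA, sB, sC, acc) p =
      if sA ≤ sB ∧ sA ≤ sC then (sA + p, sB, sC, acc ++ ["A"])
      else if sB ≤ sC then (sA, sB + p, sC, acc ++ ["B"])
      else (sA, sB, sC + p, acc ++ ["C"]) := by
  simp only [charityAllocationStep, min_def]
  split_ifs <;> first | rfl | omega

lemma bstep_sort3 (sA sB sC p : Int) (acc : List String) :
    charityAllocationAltStep (sort3 sA sB sC, acc) p =
      if sA ≤ sB ∧ sA ≤ sC then (sort3 (sA + p) sB sC, acc ++ ["A"])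
      else if sB ≤ sC then (sort3 sA (sB + p) sC, acc ++ ["B"])
      else (sort3 sA sB (sC + p), acc ++ ["C"]) := by
  unfold sort3
  split_ifs with h1 h2 h3 <;>
    (simp only [charityAllocationAltStep, insertPair, pairLt, dAB, dBA, dAC, dCA, dBC, dCB,
        Bool.and_false, Bool.and_true, Bool.or_false]
     split_ifs <;> simp_all <;> omega)

lemma loop_eq (profits : List Int) : ∀ (sA sB sC : Int) (acc : List String),
    profits.foldl charityAllocationAltStep (sort3 sA sB sC, acc) =
      ((fun r => (sort3 r.1 r.2.1 r.2.2.1, r.2.2.2))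
        (profits.foldl charityAllocationStep (sA, sB, sC, acc))) := by
  induction profits with
  | nil => intro sA sB sC acc; rfl
  | cons p ps ih =>
    intro sA sB sC acc
    simp only [List.foldl_cons, astep_eq, bstep_sort3]
    split_ifs <;> exact ih _ _ _ _

-- ===== VERDICT (by name: the statement is the Claim_ definition above) =====
theorem charityAllocation_spec : Claim_equal_charityAllocation := by
  intro profits _
  unfold Spec_charityAllocation charityAllocation charityAllocation_alt
  have h := loop_eq profits 0 0 0 []
  have hs : sort3 0 0 0 = [(0, "A"), (0, "B"), (0, "C")] := by decide
  rw [hs] at h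
  rw [h]
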